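-- pv_equiv track=rewrite | github.com/s3yoonpark/BIO-Solutions | BIO/2017/q1.py | solve
-- ===== SOURCE A (Python) =====
-- def solve(start):
--     if len(start) == 1:
--         return "".join(start)
--
--     result = []
--
--     for i in range(len(start)-1):
--         if start[i] == start[i+1]:
--             result.append(start[i])
--         else:
--             temp = ["R","G","B"]
--             temp.remove(start[i])
--             temp.remove(start[i+1])
--             result.append(temp[0])
--
--     return solve(result)
-- ===== SOURCE B (Python) =====
-- def solve(start):
--     if all(c == start[0] for c in start):
--         return start[0]
--     # encode colors as residues mod 3; the neighbor rule is uniformly (a, b) -> -(a + b) mod 3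
--     idx = {"R": 0, "G": 1, "B": 2}
--     v = [idx[c] for c in start]
--     # one reduction step is v -> [-(v[i]+v[i+1]) % 3]; 3^k steps collapse to
--     # v -> [-(v[i]+v[i+3^k]) % 3] (binomials C(3^k, j) vanish mod 3 except j = 0, 3^k),
--     # so reduce by the largest power of 3 each round: O(n) total instead of O(n^2).
--     while len(v) > 1:
--         p = 1
--         while p * 3 <= len(v) - 1:
--             p *= 3
--         v = [-(v[i] + v[i + p]) % 3 for i in range(len(v) - p)]
--     return "RGB"[v[0]]
-- ===== Notes on version B (the rewrite author's own statement) =====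
-- stated objective: faster
-- what changed: B short-circuits all-equal lists and otherwise replaces A's n-1 pairwise-reduction passes by encoding colors as residues mod 3 and collapsing the list in chunks whose width is the largest power of 3 that fits, using that the rule is uniformly (a,b) -> -(a+b) mod 3 and that C(3^k, j) vanishes mod 3 except at the ends, so 3^k passes equal one width-3^k pass.
import Mathlib
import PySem

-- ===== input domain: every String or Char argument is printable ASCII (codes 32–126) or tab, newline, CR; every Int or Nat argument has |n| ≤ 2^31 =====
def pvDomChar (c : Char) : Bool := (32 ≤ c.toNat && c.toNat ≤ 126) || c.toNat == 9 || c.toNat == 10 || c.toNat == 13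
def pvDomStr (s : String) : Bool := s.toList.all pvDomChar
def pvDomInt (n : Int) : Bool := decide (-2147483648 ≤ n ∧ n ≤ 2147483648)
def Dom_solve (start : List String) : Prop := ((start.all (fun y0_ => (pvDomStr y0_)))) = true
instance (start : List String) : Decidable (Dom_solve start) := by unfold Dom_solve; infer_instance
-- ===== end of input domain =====

-- B replaces A's quadratic pairwise reduction by an O(n) residue-mod-3 collapse in chunks of
-- powers of 3 (binomials C(3^k, j) vanish mod 3 except at the ends); objective: faster.

-- ===== PORT A =====
-- loop body of A's for-loop: the element appended for index i
def solveElem (start : List String) (i : Int) : String :=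
  let a := (PySem.List.pyGet? start i).getD ""
  let b := (PySem.List.pyGet? start (i + 1)).getD ""
  if a == b then a
  else
    let temp : List String := ["R", "G", "B"]
    let temp := (PySem.List.remove? temp a).getD []      -- none = ValueError (outside Pre_)
    let temp := (PySem.List.remove? temp b).getD []
    (PySem.List.pyGet? temp 0).getD ""

-- termination helper for `solve` (the loop appends one element per index)
theorem solveA_result_length (start : List String) (h : ¬ start.length = 0) :
    ((PySem.List.pyRange 0 ((start.length : Int) - 1) 1).foldl
      (fun r i => r ++ [solveElem start i]) []).length < start.length := by
  rw [PySem.List.foldl_append_singleton_eq_map]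
  simp [PySem.List.length_pyRange_one]
  omega

def solve (start : List String) : String :=
  if start.length = 1 then PySem.Str.join "" start
  else if h0 : start.length = 0 then ""   -- totality guard: Python A recurses forever on [] (outside Pre_)
  else
    solve ((PySem.List.pyRange 0 ((start.length : Int) - 1) 1).foldl
      (fun r i => r ++ [solveElem start i]) [])
termination_by start.length
decreasing_by exact solveA_result_length start h0

-- ===== PORT B =====
-- v := [-(v[i] + v[i+p]) % 3 for i in range(len(v) - p)]
def combineStep (v : List Int) (p : Nat) : List Int :=
  (PySem.List.pyRange 0 ((v.length : Int) - p) 1).map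
    (fun i => PySem.Int.mod (-(PySem.List.pyGetD v i 0 + PySem.List.pyGetD v (i + p) 0)) 3)

-- while p * 3 <= bound: p *= 3   (0 < p is a totality guard; p starts at 1)
def pow3le (p bound : Nat) : Nat :=
  if 0 < p ∧ p * 3 ≤ bound then pow3le (p * 3) bound else p
termination_by bound - p
decreasing_by omega

theorem le_pow3le (p bound : Nat) : p ≤ pow3le p bound := by
  fun_induction pow3le p bound with
  | case1 hc ih => omega
  | case2 hc => exact Nat.le_refl _

-- termination helper for the while-loop of B
theorem combineStep_length_lt (v : List Int) (h : v.length > 1) :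
    (combineStep v (pow3le 1 (v.length - 1))).length < v.length := by
  have h1 := le_pow3le 1 (v.length - 1)
  simp [combineStep, PySem.List.length_pyRange_one]
  omega

-- while len(v) > 1: …
def reduceLoop (v : List Int) : List Int :=
  if h : v.length > 1 then reduceLoop (combineStep v (pow3le 1 (v.length - 1))) else v
termination_by v.length
decreasing_by exact combineStep_length_lt v h

def solve_alt (start : List String) : String :=
  -- if all(c == start[0] for c in start): return start[0]
  if start.all (fun c => c == (PySem.List.pyGet? start 0).getD "") then
    (PySem.List.pyGet? start 0).getD ""
  else
    let idx : PySem.Dict String Int := PySem.Dict.ofList [("R", 0), ("G", 1), ("B", 2)]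
    let v := start.map (fun c => (PySem.Dict.get? idx c).getD 0)   -- none = KeyError (outside Pre_)
    let v := reduceLoop v
    ((PySem.Str.pyGet? "RGB" (PySem.List.pyGetD v 0 0)).map (fun c => String.ofList [c])).getD ""

-- ===== PRECONDITION & SPEC =====
-- Pre_ excludes the empty list (A recurses forever, B raises IndexError) and lists with two
-- distinct elements one of which is not "R"/"G"/"B" (A raises ValueError at the first unequal
-- non-color pair, B raises KeyError); it admits every input on which A returns: nonempty lists
-- that are all-equal or all colors.
def Pre_solve (start : List String) : Prop :=
  start ≠ [] ∧ ((∀ s ∈ start, s = start.getD 0 "") ∨ ∀ s ∈ start, s ∈ (["R", "G", "B"] : List String))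
instance (start : List String) : Decidable (Pre_solve start) := by unfold Pre_solve; infer_instance

def pvWitness_solve : List String := ["R", "G", "B", "B", "G"]

def Spec_solve (start : List String) (out : String) : Prop := out = solve_alt start
instance (start : List String) (out : String) : Decidable (Spec_solve start out) := by unfold Spec_solve; infer_instance

-- ===== CLAIM (what is proved, stated in full; the proofs are below) =====
def Claim_equal_solve : Prop := ∀ (start : List String), Dom_solve start → Pre_solve start → Spec_solve start (solve start)

-- ===== LEMMAS AND PROOFS =====

-- semantic layer: colors as residues mod 3
def encC (s : String) : Int := if s = "R" then 0 else if s = "G" then 1 else 2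
def decC (k : Int) : String := if k = 0 then "R" else if k = 1 then "G" else "B"

-- clean form of one combining pass of width p
def cI (p : Nat) (v : List Int) : List Int :=
  (List.range (v.length - p)).map (fun i => (-(v.getD i 0 + v.getD (i + p) 0)) % 3)

-- the common value both programs compute: iterate the width-1 step to a single residue
def iterSem (v : List Int) : Int :=
  if h : v.length > 1 then iterSem (combineStep v 1) else PySem.List.pyGetD v 0 0
termination_by v.length
decreasing_by exact (by simp [combineStep, PySem.List.length_pyRange_one]; omega :
  (combineStep v 1).length < v.length)

theorem length_cI (p : Nat) (v : List Int) : (cI p v).length = v.length - p := by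
  simp [cI]

theorem combineStep_eq_cI (v : List Int) (p : Nat) (hp : p ≤ v.length) :
    combineStep v p = cI p v := by
  unfold combineStep cI
  rw [PySem.List.pyRange_one]
  have hb : (((v.length : Int) - p) - 0).toNat = v.length - p := by omega
  rw [hb, List.map_map]
  apply List.map_congr_left
  intro k hk
  simp only [List.mem_range] at hk
  simp only [Function.comp_apply]
  rw [PySem.Int.mod_eq_emod_of_pos (by omega)]
  have h1 : (0 : Int) + (k : Int) = ((k : Nat) : Int) := by push_cast; ring
  have h2 : (k : Int) + (p : Int) = ((k + p : Nat) : Int) := by push_cast; ring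
  rw [h1, h2, PySem.List.pyGetD_natCast, PySem.List.pyGetD_natCast]

theorem cI_getD (p : Nat) (v : List Int) (i : Nat) (h : i < v.length - p) :
    (cI p v).getD i 0 = (-(v.getD i 0 + v.getD (i + p) 0)) % 3 := by
  simp [cI, List.getD_eq_getElem?_getD, h]

theorem cI_mem_range (p : Nat) (v : List Int) (x : Int) (hx : x ∈ cI p v) :
    0 ≤ x ∧ x < 3 := by
  simp only [cI, List.mem_map, List.mem_range] at hx
  obtain ⟨i, _, rfl⟩ := hx
  exact ⟨Int.emod_nonneg _ (by omega), Int.emod_lt_of_pos _ (by omega)⟩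

theorem cI_triple (p : Nat) (v : List Int) (hp : 1 ≤ p) (h : 3 * p < v.length) :
    cI p (cI p (cI p v)) = cI (3 * p) v := by
  have l1 : (cI p v).length = v.length - p := length_cI p v
  have l2 : (cI p (cI p v)).length = v.length - 2 * p := by rw [length_cI, l1]; omega
  apply List.ext_getElem (by simp [length_cI]; omega)
  intro i h1 h2
  have hi : i < v.length - 3 * p := by rw [length_cI] at h2; omega
  have e3 : ∀ j, j < v.length - 3 * p → (cI p (cI p (cI p v))).getD j 0 =
      (-((cI p (cI p v)).getD j 0 + (cI p (cI p v)).getD (j + p) 0)) % 3 := by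
    intro j hj; exact cI_getD p _ j (by rw [l2]; omega)
  have e2 : ∀ j, j < v.length - 2 * p → (cI p (cI p v)).getD j 0 =
      (-((cI p v).getD j 0 + (cI p v).getD (j + p) 0)) % 3 := by
    intro j hj; exact cI_getD p _ j (by rw [l1]; omega)
  have e1 : ∀ j, j < v.length - p → (cI p v).getD j 0 =
      (-(v.getD j 0 + v.getD (j + p) 0)) % 3 := by
    intro j hj; exact cI_getD p v j hj
  rw [← List.getD_eq_getElem (cI p (cI p (cI p v))) 0 h1,
      ← List.getD_eq_getElem (cI (3 * p) v) 0 h2]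
  rw [e3 i hi, e2 i (by omega), e2 (i + p) (by omega),
      e1 i (by omega), e1 (i + p) (by omega), e1 (i + p + p) (by omega),
      cI_getD (3 * p) v i (by omega)]
  rw [show i + p + p + p = i + 3 * p from by omega]
  omega

theorem iterSem_step (v : List Int) (h : 1 < v.length) : iterSem v = iterSem (cI 1 v) := by
  rw [iterSem, dif_pos h, combineStep_eq_cI v 1 (by omega)]

theorem iterSem_cI (k : Nat) (v : List Int) (h1 : 3 ^ k ≤ v.length - 1) (h2 : 1 < v.length) :
    iterSem (cI (3 ^ k) v) = iterSem v := by
  induction k generalizing v with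
  | zero => simpa using (iterSem_step v h2).symm
  | succ k ih =>
    have hp1 : 1 ≤ 3 ^ k := Nat.one_le_pow _ _ (by omega)
    have hpow : (3 : Nat) ^ (k + 1) = 3 * 3 ^ k := by ring
    rw [hpow] at h1 ⊢
    rw [← cI_triple (3 ^ k) v hp1 (by omega)]
    have l1 : (cI (3 ^ k) v).length = v.length - 3 ^ k := length_cI _ _
    have l2 : (cI (3 ^ k) (cI (3 ^ k) v)).length = v.length - 2 * 3 ^ k := by
      rw [length_cI, l1]; omega
    rw [ih (cI (3 ^ k) (cI (3 ^ k) v)) (by omega) (by omega),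
        ih (cI (3 ^ k) v) (by omega) (by omega), ih v (by omega) h2]

theorem iterSem_range_aux (n : Nat) : ∀ (w : List Int), w.length = n →
    (∀ x ∈ w, 0 ≤ x ∧ x < 3) → 1 ≤ w.length → 0 ≤ iterSem w ∧ iterSem w < 3 := by
  induction n using Nat.strong_induction_on with
  | _ n ih =>
    intro w rfl hmem hlen
    by_cases h : 1 < w.length
    · rw [iterSem_step w h]
      exact ih (cI 1 w).length (by rw [length_cI]; omega) _ rfl
        (fun x hx => cI_mem_range 1 w x hx) (by rw [length_cI]; omega)
    · rw [iterSem, dif_neg h]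
      obtain ⟨x, rfl⟩ : ∃ x, w = [x] := by
        cases w with
        | nil => simp at hlen
        | cons a t => cases t with
          | nil => exact ⟨a, rfl⟩
          | cons b u => simp at h
      simpa using hmem x (by simp)

theorem iterSem_range (v : List Int) (h : 1 < v.length) :
    0 ≤ iterSem v ∧ iterSem v < 3 := by
  rw [iterSem_step v h]
  exact iterSem_range_aux (cI 1 v).length _ rfl (fun x hx => cI_mem_range 1 v x hx)
    (by rw [length_cI]; omega)

theorem pow3le_pow (p bound : Nat) : (∃ k, p = 3 ^ k) → ∃ k, pow3le p bound = 3 ^ k := by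
  fun_induction pow3le p bound with
  | case1 p hc ih =>
    rintro ⟨k, rfl⟩
    exact ih ⟨k + 1, by ring⟩
  | case2 p hc => exact id

theorem pow3le_le (p bound : Nat) : p ≤ bound → pow3le p bound ≤ bound := by
  fun_induction pow3le p bound with
  | case1 p hc ih => intro _; exact ih (by omega)
  | case2 p hc => exact id

theorem reduceLoop_sem (v : List Int) : 1 ≤ v.length →
    PySem.List.pyGetD (reduceLoop v) 0 0 = iterSem v := by
  fun_induction reduceLoop v with
  | case1 v h ih =>
    intro _
    obtain ⟨k, hk⟩ := pow3le_pow 1 (v.length - 1) ⟨0, by norm_num⟩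
    have hle : pow3le 1 (v.length - 1) ≤ v.length - 1 := pow3le_le 1 _ (by omega)
    have h1p : 1 ≤ pow3le 1 (v.length - 1) := le_pow3le 1 _
    rw [combineStep_eq_cI v _ (by omega)] at ih ⊢
    rw [ih (by rw [length_cI]; omega), hk, iterSem_cI k v (by omega) h]
  | case2 v h =>
    intro _
    rw [iterSem, dif_neg h]

theorem decC_mem (k : Int) : decC k ∈ (["R", "G", "B"] : List String) := by
  unfold decC; split_ifs <;> simp

theorem encC_decC (k : Int) (h0 : 0 ≤ k) (h3 : k < 3) : encC (decC k) = k := by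
  interval_cases k <;> decide

theorem decC_encC (s : String) (h : s ∈ (["R", "G", "B"] : List String)) : decC (encC s) = s := by
  simp only [List.mem_cons] at h
  rcases h with rfl | rfl | rfl | h <;> first | decide | simp at h

theorem getD_mem_of_lt (xs : List String) (i : Nat) (hi : i < xs.length) :
    xs.getD i "" ∈ xs := by
  rw [List.getD_eq_getElem xs "" hi]
  exact List.getElem_mem hi

theorem getD_map_encC (xs : List String) (j : Nat) (hj : j < xs.length) :
    (xs.map encC).getD j 0 = encC (xs.getD j "") := by
  rw [List.getD_eq_getElem?_getD, List.getElem?_map, List.getElem?_eq_getElem hj,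
      List.getD_eq_getElem xs "" hj]
  rfl

theorem solveElem_color (xs : List String)
    (hval : ∀ s ∈ xs, s ∈ (["R", "G", "B"] : List String)) (i : Nat) (hi : i + 1 < xs.length) :
    solveElem xs (i : Int) =
      decC ((-(encC (xs.getD i "") + encC (xs.getD (i + 1) ""))) % 3) := by
  have ha := hval _ (getD_mem_of_lt xs i (by omega))
  have hb := hval _ (getD_mem_of_lt xs (i + 1) hi)
  unfold solveElem
  have hcast : (i : Int) + 1 = ((i + 1 : Nat) : Int) := by push_cast; ring_nf
  rw [hcast]
  simp only [PySem.List.pyGet?_natCast, ← List.getD_eq_getElem?_getD]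
  generalize xs.getD i "" = a at ha ⊢
  generalize xs.getD (i + 1) "" = b at hb ⊢
  simp only [List.mem_cons, List.not_mem_nil, or_false] at ha hb
  rcases ha with rfl | rfl | rfl <;> rcases hb with rfl | rfl | rfl <;> decide

theorem solveA_sem_aux (n : Nat) : ∀ (xs : List String), xs.length = n →
    (∀ s ∈ xs, s ∈ (["R", "G", "B"] : List String)) →
    1 ≤ xs.length → solve xs = decC (iterSem (xs.map encC)) := by
  induction n using Nat.strong_induction_on with
  | _ n ih =>
    intro xs rfl hval hlen
    by_cases h1 : xs.length = 1
    · obtain ⟨s, rfl⟩ : ∃ s, xs = [s] := by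
        cases xs with
        | nil => simp at h1
        | cons a t => cases t with
          | nil => exact ⟨a, rfl⟩
          | cons b u => simp at h1
      have hA : solve [s] = s := by rw [solve]; simp [PySem.Str.join]
      have hI : iterSem ([s].map encC) = encC s := by
        rw [iterSem, dif_neg (by simp)]; rfl
      rw [hA, hI, decC_encC s (hval s (by simp))]
    · have hlen2 : 2 ≤ xs.length := by omega
      rw [solve, if_neg h1, dif_neg (by omega)]
      rw [PySem.List.foldl_append_singleton_eq_map, List.nil_append, PySem.List.pyRange_one]
      have hb : (((xs.length : Int) - 1) - 0).toNat = xs.length - 1 := by omega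
      rw [hb, List.map_map]
      have hres : (List.range (xs.length - 1)).map (solveElem xs ∘ fun k : Nat => 0 + (k : Int)) =
          (cI 1 (xs.map encC)).map decC := by
        unfold cI
        rw [List.length_map, List.map_map]
        apply List.map_congr_left
        intro k hk
        simp only [List.mem_range] at hk
        simp only [Function.comp_apply, zero_add]
        rw [solveElem_color xs hval k (by omega)]
        rw [getD_map_encC xs k (by omega), getD_map_encC xs (k + 1) (by omega)]
      rw [hres]
      have hvalr : ∀ s ∈ (cI 1 (xs.map encC)).map decC, s ∈ (["R", "G", "B"] : List String) := by
        intro s hs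
        obtain ⟨k, _, rfl⟩ := List.mem_map.mp hs
        exact decC_mem k
      have hlr : ((cI 1 (xs.map encC)).map decC).length = xs.length - 1 := by
        rw [List.length_map, length_cI, List.length_map]
      rw [ih (xs.length - 1) (by omega) _ hlr hvalr (by omega)]
      have hmapmap : ((cI 1 (xs.map encC)).map decC).map encC = cI 1 (xs.map encC) := by
        rw [List.map_map]
        conv_rhs => rw [← List.map_id (cI 1 (xs.map encC))]
        apply List.map_congr_left
        intro x hx
        obtain ⟨h0, h3⟩ := cI_mem_range 1 (xs.map encC) x hx
        exact encC_decC x h0 h3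
      rw [hmapmap, ← iterSem_step (xs.map encC) (by rw [List.length_map]; omega)]

theorem solveElem_replicate (n : Nat) (s : String) (i : Int)
    (h0 : 0 ≤ i) (h1 : i < (n : Int) - 1) :
    solveElem (List.replicate n s) i = s := by
  unfold solveElem
  have g1 : PySem.List.pyGet? (List.replicate n s) i = some s := by
    rw [PySem.List.pyGet?_of_nonneg _ h0, List.getElem?_replicate]
    simp only [if_pos (by omega : i.toNat < n)]
  have g2 : PySem.List.pyGet? (List.replicate n s) (i + 1) = some s := by
    rw [PySem.List.pyGet?_of_nonneg _ (by omega : (0:Int) ≤ i + 1), List.getElem?_replicate]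
    simp only [if_pos (by omega : (i + 1).toNat < n)]
  rw [g1, g2]
  simp

theorem solve_const (n : Nat) : ∀ (s : String), 1 ≤ n → solve (List.replicate n s) = s := by
  induction n using Nat.strong_induction_on with
  | _ n ih =>
    intro s hn
    by_cases h1 : n = 1
    · subst h1
      rw [solve]
      simp [PySem.Str.join]
    · rw [solve, if_neg (by simpa using h1), dif_neg (by simp; omega)]
      rw [PySem.List.foldl_append_singleton_eq_map, List.nil_append]
      have hmap : (PySem.List.pyRange 0 (((List.replicate n s).length : Int) - 1) 1).map
          (solveElem (List.replicate n s)) =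
          List.replicate (n - 1) s := by
        rw [List.eq_replicate_iff]
        constructor
        · simp [PySem.List.length_pyRange_one]
        · intro b hb
          obtain ⟨i, hi, rfl⟩ := List.mem_map.mp hb
          rw [PySem.List.mem_pyRange_one] at hi
          simp only [List.length_replicate] at hi
          exact solveElem_replicate n s i hi.1 hi.2
      rw [hmap]
      exact ih (n - 1) (by omega) s (by omega)

theorem all_eq_replicate (xs : List String)
    (h : ∀ s ∈ xs, s = xs.getD 0 "") : xs = List.replicate xs.length (xs.getD 0 "") := by
  rw [List.eq_replicate_iff]
  exact ⟨rfl, fun b hb => h b hb⟩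

theorem solveA_sem (xs : List String) (hval : ∀ s ∈ xs, s ∈ (["R", "G", "B"] : List String))
    (hlen : 1 ≤ xs.length) : solve xs = decC (iterSem (xs.map encC)) :=
  solveA_sem_aux xs.length xs rfl hval hlen

theorem rgb_index (k : Int) (h0 : 0 ≤ k) (h3 : k < 3) :
    ((PySem.Str.pyGet? "RGB" k).map (fun c => String.ofList [c])).getD "" = decC k := by
  interval_cases k <;> decide

theorem solveB_sem (xs : List String) (hval : ∀ s ∈ xs, s ∈ (["R", "G", "B"] : List String))
    (hlen : 2 ≤ xs.length)
    (hall : ¬ xs.all (fun c => c == (PySem.List.pyGet? xs 0).getD "") = true) :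
    solve_alt xs = decC (iterSem (xs.map encC)) := by
  rw [solve_alt, if_neg hall]
  have hmap : (xs.map fun c =>
      (PySem.Dict.get? (PySem.Dict.ofList [("R", 0), ("G", 1), ("B", 2)]) c).getD 0) =
      xs.map encC := by
    apply List.map_congr_left
    intro s hs
    have h := hval s hs
    simp only [List.mem_cons, List.not_mem_nil, or_false] at h
    rcases h with rfl | rfl | rfl <;> decide
  simp only [hmap]
  rw [reduceLoop_sem (xs.map encC) (by rw [List.length_map]; omega)]
  obtain ⟨h0, h3⟩ := iterSem_range (xs.map encC) (by rw [List.length_map]; omega)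
  exact rgb_index _ h0 h3

-- ===== VERDICT (by name: the statement is the Claim_ definition above) =====
theorem solve_spec : Claim_equal_solve := by
  intro start _ hpre
  unfold Spec_solve
  obtain ⟨hne, hcase⟩ := hpre
  by_cases hall : start.all (fun c => c == (PySem.List.pyGet? start 0).getD "") = true
  · -- all elements equal: A reduces a constant list to its element, B takes its early exit
    have hget : (PySem.List.pyGet? start 0).getD "" = start.getD 0 "" := by
      rw [PySem.List.pyGet?_zero, ← List.getD_eq_getElem?_getD]
    have hrep : start = List.replicate start.length (start.getD 0 "") := by
      apply all_eq_replicate start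
      intro s hs
      have := List.all_eq_true.mp hall s hs
      rw [hget] at this
      exact eq_of_beq this
    rw [solve_alt, if_pos hall, hget]
    conv_lhs => rw [hrep]
    exact solve_const start.length _ (by
      have := List.length_pos_of_ne_nil hne
      omega)
  · have hval : ∀ s ∈ start, s ∈ (["R", "G", "B"] : List String) := by
      rcases hcase with h | h
      · exfalso
        apply hall
        rw [List.all_eq_true]
        intro s hs
        rw [PySem.List.pyGet?_zero, ← List.getD_eq_getElem?_getD]
        exact beq_iff_eq.mpr (h s hs)
      · exact h
    have hlen : 2 ≤ start.length := by
      by_contra hcon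
      apply hall
      rw [List.all_eq_true]
      obtain ⟨a, t, rfl⟩ : ∃ a t, start = a :: t := by
        cases start with
        | nil => simp at hne
        | cons a t => exact ⟨a, t, rfl⟩
      have : t = [] := by
        cases t with
        | nil => rfl
        | cons b u => simp at hcon
      subst this
      intro s hs
      simp only [List.mem_singleton] at hs
      subst hs
      rw [PySem.List.pyGet?_zero]
      simp
    rw [solveA_sem start hval (by omega), solveB_sem start hval hlen hall]
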